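-- pv_equiv track=rewrite | github.com/mujizi/crf | figure_en/pre_process.py | reverse_index_mapper
-- ===== SOURCE A (Python) =====
-- def reverse_index_mapper(mapper):
--     """
--     reverse index mapper from new_index=>old_index to old_index=>new_index
--     **notice**
--         The most importance thing is some characters will become several characters.
--         Therefore, new index should select the smallest value in this situation.
--     :param mapper: mapper require to be reversed
--     :return: reversed mapper
--     """
--     new_mapper = {}
--     for new_index, old_index in mapper.items():
--         if old_index not in new_mapper:
--             new_mapper[old_index] = new_index
--         elif new_mapper[old_index] > new_index:
--             new_mapper[old_index] = new_index
--
--     return new_mapper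
-- ===== SOURCE B (Python) =====
-- def reverse_index_mapper(mapper):
--     """
--     reverse index mapper from new_index=>old_index to old_index=>new_index,
--     keeping the smallest new index per old index.
--     Two-phase: first bucket every new_index under its old_index, then reduce
--     each bucket with min.
--     """
--     groups = {}
--     for new_index, old_index in mapper.items():
--         groups.setdefault(old_index, []).append(new_index)
--     return {old: min(cands) for old, cands in groups.items()}
-- ===== Notes on version B (the rewrite author's own statement) =====
-- stated objective: alternative
-- what changed: Replaces the single pass that maintains a running minimum per old index with two differently-shaped phases: a grouping pass that materializes a bucket of all candidate new indices per old index, followed by a reduction pass taking min of each bucket.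
import Mathlib
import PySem

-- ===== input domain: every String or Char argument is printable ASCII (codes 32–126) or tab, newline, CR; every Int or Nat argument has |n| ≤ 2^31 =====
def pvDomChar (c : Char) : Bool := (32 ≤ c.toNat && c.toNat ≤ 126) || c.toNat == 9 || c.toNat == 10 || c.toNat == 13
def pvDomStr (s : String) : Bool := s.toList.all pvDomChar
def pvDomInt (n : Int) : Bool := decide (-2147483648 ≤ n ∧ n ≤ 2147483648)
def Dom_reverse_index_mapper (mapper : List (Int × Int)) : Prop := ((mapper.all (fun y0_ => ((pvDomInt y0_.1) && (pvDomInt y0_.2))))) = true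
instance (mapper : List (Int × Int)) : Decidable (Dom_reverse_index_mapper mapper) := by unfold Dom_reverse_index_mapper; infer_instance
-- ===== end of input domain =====

-- B replaces A's running-minimum pass by two phases (bucket all candidates per old index, then take min of each bucket); alternative decomposition, same cost.

-- ===== PORT A =====
-- one pass, keeping the smallest new_index seen so far for each old_index
def reverse_index_mapper (mapper : List (Int × Int)) : List (Int × Int) :=
  (mapper.foldl
    (fun nm (p : Int × Int) =>
      if nm.contains p.2 = false then nm.insert p.2 p.1
      else if nm.getD p.2 0 > p.1 then nm.insert p.2 p.1
      else nm)
    (PySem.Dict.empty : PySem.Dict Int Int)).items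

-- ===== PORT B =====
-- min(cands): cands is always nonempty by construction, the none branch is unreachable
def pyMinInt (cands : List Int) : Int :=
  match PySem.List.min? cands (fun y => y) with
  | some m => m
  | none => 0

def reverse_index_mapper_alt (mapper : List (Int × Int)) : List (Int × Int) :=
  let groups := mapper.foldl
    (fun g (p : Int × Int) => g.insert p.2 (g.getD p.2 [] ++ [p.1]))
    (PySem.Dict.empty : PySem.Dict Int (List Int))
  groups.items.map (fun q => (q.1, pyMinInt q.2))

-- ===== PRECONDITION & SPEC =====
def Spec_reverse_index_mapper (mapper : List (Int × Int)) (out : List (Int × Int)) : Prop := out = reverse_index_mapper_alt mapper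
instance (mapper : List (Int × Int)) (out : List (Int × Int)) : Decidable (Spec_reverse_index_mapper mapper out) := by unfold Spec_reverse_index_mapper; infer_instance

-- ===== CLAIM (what is proved, stated in full; the proofs are below) =====
def Claim_equal_reverse_index_mapper : Prop := ∀ (mapper : List (Int × Int)), Dom_reverse_index_mapper mapper → Spec_reverse_index_mapper mapper (reverse_index_mapper mapper)

-- ===== LEMMAS AND PROOFS =====

def pvG (q : Int × List Int) : Int × Int := (q.1, pyMinInt q.2)

lemma pyMinInt_singleton (a : Int) : pyMinInt [a] = a := by
  simp [pyMinInt, PySem.List.min?_id_cons]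

lemma pyMinInt_append (x : Int) (t : List Int) (a : Int) :
    pyMinInt ((x :: t) ++ [a]) = min (pyMinInt (x :: t)) a := by
  simp [pyMinInt, PySem.List.min?_id_cons, List.foldl_append]

lemma get?_mk_map {ν ν' : Type} (f : ν → ν') (l : List (Int × ν)) (k : Int) :
    (PySem.Dict.mk (l.map (fun q => (q.1, f q.2)))).get? k
      = ((PySem.Dict.mk l).get? k).map f := by
  induction l with
  | nil => simp [PySem.Dict.get?]
  | cons q t ih =>
      obtain ⟨a, v⟩ := q
      simp only [List.map_cons, PySem.Dict.get?_mk_cons]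
      by_cases h : a == k <;> simp [h, ih]

lemma get?_map_items (dB : PySem.Dict Int (List Int)) (k : Int) :
    (PySem.Dict.mk (dB.items.map pvG)).get? k = (dB.get? k).map pyMinInt := by
  have := get?_mk_map pyMinInt dB.items k
  simpa [pvG] using this

lemma contains_map_items (dB : PySem.Dict Int (List Int)) (k : Int) :
    (PySem.Dict.mk (dB.items.map pvG)).contains k = dB.contains k := by
  rw [PySem.Dict.contains_eq_isSome_get?, PySem.Dict.contains_eq_isSome_get?,
    get?_map_items]
  cases dB.get? k <;> rfl

lemma main_inv (l : List (Int × Int)) :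
    ∀ (dB : PySem.Dict Int (List Int)), dB.keys.Nodup → (∀ q ∈ dB.items, q.2 ≠ []) →
    (l.foldl
      (fun nm (p : Int × Int) =>
        if nm.contains p.2 = false then nm.insert p.2 p.1
        else if nm.getD p.2 0 > p.1 then nm.insert p.2 p.1
        else nm)
      (PySem.Dict.mk (dB.items.map pvG))).items
    = ((l.foldl
        (fun g (p : Int × Int) => g.insert p.2 (g.getD p.2 [] ++ [p.1]))
        dB).items).map pvG := by
  induction l with
  | nil => intro dB _ _; simp
  | cons p t ih =>
      intro dB hnd hne
      simp only [List.foldl_cons]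
      set dA := PySem.Dict.mk (dB.items.map pvG) with hdA
      by_cases hc : dB.contains p.2
      · -- key already present
        obtain ⟨cs, hcs⟩ : ∃ cs, dB.get? p.2 = some cs := by
          rw [PySem.Dict.contains_eq_isSome_get?] at hc
          cases h : dB.get? p.2 with
          | none => rw [h] at hc; simp at hc
          | some cs => exact ⟨cs, rfl⟩
        have hmem : (p.2, cs) ∈ dB.items := PySem.Dict.mem_items_of_get?_eq_some dB hcs
        have hcs_ne : cs ≠ [] := hne _ hmem
        have hAc : dA.contains p.2 = true := by rw [hdA, contains_map_items]; exact hc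
        have hAget : dA.getD p.2 0 = pyMinInt cs := by
          rw [PySem.Dict.getD_eq_get?_getD, hdA, get?_map_items, hcs]; rfl
        have hBgetD : dB.getD p.2 [] = cs := PySem.Dict.getD_of_get?_eq_some dB [] hcs
        -- the B-side step
        have hBstep : (dB.insert p.2 (dB.getD p.2 [] ++ [p.1])).items
            = dB.items.map (fun q => if q.1 == p.2 then (p.2, cs ++ [p.1]) else q) := by
          rw [hBgetD, PySem.Dict.items_insert_of_contains _ _ hc]
        obtain ⟨x, cs', rfl⟩ : ∃ x cs', cs = x :: cs' := by
          cases cs with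
          | nil => exact absurd rfl hcs_ne
          | cons x cs' => exact ⟨x, cs', rfl⟩
        have hminapp : pyMinInt ((x :: cs') ++ [p.1]) = min (pyMinInt (x :: cs')) p.1 :=
          pyMinInt_append x cs' p.1
        -- invariant for the next dict
        have hnd' : (dB.insert p.2 (dB.getD p.2 [] ++ [p.1])).keys.Nodup :=
          PySem.Dict.nodup_keys_insert _ _ _ hnd
        have hne' : ∀ q ∈ (dB.insert p.2 (dB.getD p.2 [] ++ [p.1])).items, q.2 ≠ [] := by
          intro q hq
          rw [PySem.Dict.mem_items_insert] at hq
          rcases hq with rfl | ⟨hq, _⟩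
          · simp
          · exact hne _ hq
        have ihB := ih _ hnd' hne'
        -- it remains to identify the A-side step with mk of the mapped B-side step
        have hstep : (if dA.contains p.2 = false then dA.insert p.2 p.1
            else if dA.getD p.2 0 > p.1 then dA.insert p.2 p.1 else dA)
            = PySem.Dict.mk ((dB.insert p.2 (dB.getD p.2 [] ++ [p.1])).items.map pvG) := by
          apply PySem.Dict.ext
          rw [hBstep, List.map_map]
          simp only [hAc, Bool.true_eq_false, if_false]
          by_cases hgt : dA.getD p.2 0 > p.1
          · rw [if_pos hgt]
            have : dA.contains p.2 = true := hAc
            rw [PySem.Dict.items_insert_of_contains _ _ this, hdA]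
            rw [List.map_map]
            apply List.map_congr_left
            intro q _
            by_cases hk : q.1 == p.2
            · have : min (pyMinInt (x :: cs')) p.1 = p.1 := by
                rw [hAget] at hgt; omega
              have hminapp' : pyMinInt (x :: (cs' ++ [p.1]))
                  = min (pyMinInt (x :: cs')) p.1 := hminapp
              simp [Function.comp, pvG, hk, hminapp', this]
            · simp [Function.comp, pvG, hk]
          · rw [if_neg hgt, hdA]
            apply List.map_congr_left
            intro q hq
            by_cases hk : q.1 == p.2
            · have hk' : q.1 = p.2 := by simpa using hk
              have hget : dB.get? q.1 = some q.2 := by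
                rw [PySem.Dict.get?_eq_some_iff_mem_items dB q.1 q.2 hnd]
                simpa using hq
              rw [hk', hcs] at hget
              have hq2 : q = (p.2, x :: cs') := by
                cases q with
                | mk a b =>
                  simp only at hk' hget ⊢
                  injection hget with hb
                  exact Prod.ext hk' hb.symm
              have hmin : min (pyMinInt (x :: cs')) p.1 = pyMinInt (x :: cs') := by
                rw [hAget] at hgt; omega
              have hminapp' : pyMinInt (x :: (cs' ++ [p.1]))
                  = min (pyMinInt (x :: cs')) p.1 := hminapp
              simp [Function.comp, pvG, hq2, hminapp', hmin]
            · simp [Function.comp, pvG, hk]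
        rw [hstep, ihB]
      · -- fresh key
        have hc' : dB.contains p.2 = false := by simpa using hc
        have hAc : dA.contains p.2 = false := by rw [hdA, contains_map_items]; exact hc'
        have hBgetD : dB.getD p.2 [] = [] := PySem.Dict.getD_of_not_contains dB [] hc'
        have hnd' : (dB.insert p.2 (dB.getD p.2 [] ++ [p.1])).keys.Nodup :=
          PySem.Dict.nodup_keys_insert _ _ _ hnd
        have hne' : ∀ q ∈ (dB.insert p.2 (dB.getD p.2 [] ++ [p.1])).items, q.2 ≠ [] := by
          intro q hq
          rw [PySem.Dict.mem_items_insert] at hq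
          rcases hq with rfl | ⟨hq, _⟩
          · simp [hBgetD]
          · exact hne _ hq
        have ihB := ih _ hnd' hne'
        have hstep : (if dA.contains p.2 = false then dA.insert p.2 p.1
            else if dA.getD p.2 0 > p.1 then dA.insert p.2 p.1 else dA)
            = PySem.Dict.mk ((dB.insert p.2 (dB.getD p.2 [] ++ [p.1])).items.map pvG) := by
          apply PySem.Dict.ext
          rw [if_pos hAc, hBgetD]
          rw [PySem.Dict.items_insert_of_not_contains _ _ hAc,
            PySem.Dict.items_insert_of_not_contains _ _ hc']
          simp [hdA, pvG, pyMinInt_singleton]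
        rw [hstep, ihB]

-- ===== VERDICT (by name: the statement is the Claim_ definition above) =====
theorem reverse_index_mapper_spec : Claim_equal_reverse_index_mapper := by
  intro mapper _
  unfold Spec_reverse_index_mapper reverse_index_mapper reverse_index_mapper_alt
  have h := main_inv mapper (PySem.Dict.empty : PySem.Dict Int (List Int))
    (by simp) (by simp [PySem.Dict.empty])
  simpa [pvG] using h
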